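-- pv_equiv track=rewrite | github.com/dingshiji/my-code-snippets | log-analyze.py | collect_context_indices
-- ===== SOURCE A (Python) =====
-- from typing import List, Tuple, Dict, Any, Optional
--
-- def is_date_line(line: str, prefix: str) -> bool:
--     # 严格以指定日期起始，例如 "2025-09-05 04:00:01 ..."
--     return line.startswith(prefix)
--
-- def collect_context_indices(lines: List[str], start: int, end: int,
--                             prefix: str, n_before: int, n_after: int) -> Tuple[List[int], List[int]]:
--     """围绕异常区间[start, end]，向前/向后各收集至多 n_before / n_after 条“日期开头”行的索引"""
--     before_idx: List[int] = []
--     i = start - 1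
--     while i >= 0 and len(before_idx) < n_before:
--         if is_date_line(lines[i], prefix):
--             before_idx.append(i)
--         i -= 1
--     before_idx.reverse()
--
--     after_idx: List[int] = []
--     j = end + 1
--     while j < len(lines) and len(after_idx) < n_after:
--         if is_date_line(lines[j], prefix):
--             after_idx.append(j)
--         j += 1
--     return before_idx, after_idx
-- ===== SOURCE B (Python) =====
-- from typing import List, Tuple
--
-- def collect_context_indices(lines: List[str], start: int, end: int,
--                             prefix: str, n_before: int, n_after: int) -> Tuple[List[int], List[int]]:
--     if n_before > 0:
--         before_idx = [i for i in range(min(start, len(lines))) if lines[i].startswith(prefix)][-n_before:]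
--     else:
--         before_idx = []
--     if n_after > 0:
--         after_idx = [j for j in range(end + 1, len(lines)) if lines[j].startswith(prefix)][:n_after]
--     else:
--         after_idx = []
--     return before_idx, after_idx
-- ===== Notes on version B (the rewrite author's own statement) =====
-- stated objective: idiomatic
-- what changed: The two early-stopping while-loops (backward with a final reverse, forward) are replaced by two filtered range comprehensions over each whole side, sliced to the last n_before / first n_after entries, with explicit guards for non-positive counts.
import Mathlib
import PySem

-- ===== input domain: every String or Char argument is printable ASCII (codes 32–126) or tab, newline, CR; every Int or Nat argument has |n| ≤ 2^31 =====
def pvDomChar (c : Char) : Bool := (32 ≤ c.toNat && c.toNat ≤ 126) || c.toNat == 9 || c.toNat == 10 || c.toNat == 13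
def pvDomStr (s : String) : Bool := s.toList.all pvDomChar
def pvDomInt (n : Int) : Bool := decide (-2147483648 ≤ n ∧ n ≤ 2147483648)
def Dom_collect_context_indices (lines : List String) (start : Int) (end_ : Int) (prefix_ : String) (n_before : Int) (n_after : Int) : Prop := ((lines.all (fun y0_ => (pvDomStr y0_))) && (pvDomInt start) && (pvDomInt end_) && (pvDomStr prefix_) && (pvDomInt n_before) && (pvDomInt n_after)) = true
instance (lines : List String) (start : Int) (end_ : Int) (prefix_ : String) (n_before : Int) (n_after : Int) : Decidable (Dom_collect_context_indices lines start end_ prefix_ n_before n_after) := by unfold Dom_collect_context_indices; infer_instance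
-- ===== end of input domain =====

-- B replaces A's two early-stopping while-loops by filtered ranges plus a slice / take
-- (idiomatic decomposition, same cost); equivalence is about the return value only.

-- ===== PORT A =====
-- lines[i].startswith(prefix) (index valid on every admitted input; getD "" is never taken there)
def pvIsDate (lines : List String) (prefix_ : String) (i : Int) : Bool :=
  PySem.Str.startswith ((PySem.List.pyGet? lines i).getD "") prefix_

-- the first while loop: fuel k encodes i = k - 1 (loop runs while i ≥ 0, i.e. fuel > 0)
def pvABefore (lines : List String) (prefix_ : String) (n : Int) : Nat → List Int → List Int
  | 0, acc => acc
  | k+1, acc =>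
    if (acc.length : Int) < n then
      pvABefore lines prefix_ n k
        (if pvIsDate lines prefix_ (k : Int) then acc ++ [(k : Int)] else acc)
    else acc

-- the second while loop: j counts up, fuel = len(lines) - j
def pvAAfter (lines : List String) (prefix_ : String) (n : Int) : Nat → Int → List Int → List Int
  | 0, _, acc => acc
  | f+1, j, acc =>
    if (acc.length : Int) < n then
      pvAAfter lines prefix_ n f (j + 1)
        (if pvIsDate lines prefix_ j then acc ++ [j] else acc)
    else acc

def collect_context_indices (lines : List String) (start : Int) (end_ : Int) (prefix_ : String) (n_before : Int) (n_after : Int) : List Int × List Int :=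
  ((pvABefore lines prefix_ n_before start.toNat []).reverse,
   pvAAfter lines prefix_ n_after ((lines.length : Int) - (end_ + 1)).toNat (end_ + 1) [])

-- ===== PORT B =====
def collect_context_indices_alt (lines : List String) (start : Int) (end_ : Int) (prefix_ : String) (n_before : Int) (n_after : Int) : List Int × List Int :=
  (if 0 < n_before then
      PySem.List.slice
        ((PySem.List.pyRange 0 (min start (lines.length : Int)) 1).filter (pvIsDate lines prefix_))
        (some (-n_before)) none
    else [],
   if 0 < n_after then
      ((PySem.List.pyRange (end_ + 1) (lines.length : Int) 1).filter (pvIsDate lines prefix_)).take n_after.toNat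
    else [])

-- ===== PRECONDITION & SPEC =====
-- Pre_ excludes exactly the inputs where the Python raises IndexError: a backward scan
-- entered with start > len(lines) (A raises, B returns), and a forward scan entered at
-- end+1 < -len(lines) (both A and B raise).
def Pre_collect_context_indices (lines : List String) (start : Int) (end_ : Int) (prefix_ : String) (n_before : Int) (n_after : Int) : Prop :=
  (0 < n_before → start ≤ (lines.length : Int)) ∧
  (0 < n_after → -(lines.length : Int) ≤ end_ + 1)
instance (lines : List String) (start : Int) (end_ : Int) (prefix_ : String) (n_before : Int) (n_after : Int) : Decidable (Pre_collect_context_indices lines start end_ prefix_ n_before n_after) := by unfold Pre_collect_context_indices; infer_instance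

def pvWitness_collect_context_indices : List String × Int × Int × String × Int × Int :=
  (["2025 a", "x", "2025 b", "2025 c"], 2, 2, "2025", 2, 2)

def Spec_collect_context_indices (lines : List String) (start : Int) (end_ : Int) (prefix_ : String) (n_before : Int) (n_after : Int) (out : List Int × List Int) : Prop := out = collect_context_indices_alt lines start end_ prefix_ n_before n_after
instance (lines : List String) (start : Int) (end_ : Int) (prefix_ : String) (n_before : Int) (n_after : Int) (out : List Int × List Int) : Decidable (Spec_collect_context_indices lines start end_ prefix_ n_before n_after out) := by unfold Spec_collect_context_indices; infer_instance

-- ===== CLAIM (what is proved, stated in full; the proofs are below) =====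
def Claim_equal_collect_context_indices : Prop := ∀ (lines : List String) (start : Int) (end_ : Int) (prefix_ : String) (n_before : Int) (n_after : Int), Dom_collect_context_indices lines start end_ prefix_ n_before n_after → Pre_collect_context_indices lines start end_ prefix_ n_before n_after → Spec_collect_context_indices lines start end_ prefix_ n_before n_after (collect_context_indices lines start end_ prefix_ n_before n_after)
-- ===== LEMMAS AND PROOFS =====

-- before-loop invariant: with fuel k the loop scans i = k-1, k-2, ..., 0 and collects
-- the first (n - |acc|) matching indices of that descending list
theorem pvABefore_eq (lines : List String) (prefix_ : String) (n : Int) :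
    ∀ (k : Nat) (acc : List Int),
      pvABefore lines prefix_ n k acc =
        acc ++ ((PySem.List.pyRange ((k : Int) - 1) (-1) (-1)).filter
                  (pvIsDate lines prefix_)).take (n - acc.length).toNat := by
  intro k
  induction k with
  | zero =>
    intro acc
    rw [PySem.List.pyRange_neg_one_eq_nil (by omega)]
    simp [pvABefore]
  | succ k ih =>
    intro acc
    rw [pvABefore]
    by_cases h : (acc.length : Int) < n
    · rw [if_pos h]
      rw [show ((k + 1 : Nat) : Int) - 1 = (k : Int) by push_cast; omega]
      rw [PySem.List.pyRange_neg_one_cons (by omega : (-1 : Int) < (k : Int))]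
      rw [List.filter_cons]
      by_cases hp : pvIsDate lines prefix_ (k : Int)
      · rw [if_pos hp, ih]
        simp only [hp, if_pos]
        have hlen : (n - ((acc ++ [(k : Int)]).length : Int)).toNat = (n - acc.length).toNat - 1 := by
          simp; omega
        rw [hlen]
        have hpos : 0 < (n - acc.length).toNat := by omega
        obtain ⟨m, hm⟩ : ∃ m, (n - acc.length).toNat = m + 1 := ⟨_, (Nat.succ_pred_eq_of_pos hpos).symm⟩
        rw [hm]
        simp [List.take_succ_cons, List.append_assoc]
      · rw [if_neg hp, ih]
        simp [hp]
    · rw [if_neg h]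
      have h0 : (n - acc.length).toNat = 0 := by omega
      simp [h0]

-- after-loop invariant: scanning j, j+1, ..., j+f-1 collects the first (n - |acc|) matches
theorem pvAAfter_eq (lines : List String) (prefix_ : String) (n : Int) :
    ∀ (f : Nat) (j : Int) (acc : List Int),
      pvAAfter lines prefix_ n f j acc =
        acc ++ ((PySem.List.pyRange j (j + f) 1).filter
                  (pvIsDate lines prefix_)).take (n - acc.length).toNat := by
  intro f
  induction f with
  | zero =>
    intro j acc
    rw [PySem.List.pyRange_one_eq_nil (by omega : j + ((0 : Nat) : Int) ≤ j)]
    simp [pvAAfter]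
  | succ f ih =>
    intro j acc
    rw [pvAAfter]
    by_cases h : (acc.length : Int) < n
    · rw [if_pos h]
      rw [PySem.List.pyRange_one_cons (by push_cast; omega : j < j + ((f + 1 : Nat) : Int))]
      rw [show j + ((f + 1 : Nat) : Int) = (j + 1) + (f : Nat) by push_cast; omega]
      rw [List.filter_cons]
      by_cases hp : pvIsDate lines prefix_ j
      · rw [if_pos hp, ih]
        simp only [hp, if_pos]
        have hlen : (n - ((acc ++ [j]).length : Int)).toNat = (n - acc.length).toNat - 1 := by
          simp; omega
        rw [hlen]
        have hpos : 0 < (n - acc.length).toNat := by omega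
        obtain ⟨m, hm⟩ : ∃ m, (n - acc.length).toNat = m + 1 := ⟨_, (Nat.succ_pred_eq_of_pos hpos).symm⟩
        rw [hm]
        simp [List.take_succ_cons, List.append_assoc]
      · rw [if_neg hp, ih]
        simp [hp]
    · rw [if_neg h]
      have h0 : (n - acc.length).toNat = 0 := by omega
      simp [h0]

-- the before component of A equals the before component of B
theorem pvBefore_final (lines : List String) (prefix_ : String) (start n_before : Int)
    (hb : 0 < n_before → start ≤ (lines.length : Int)) :
    (pvABefore lines prefix_ n_before start.toNat []).reverse =
      (if 0 < n_before then
        PySem.List.slice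
          ((PySem.List.pyRange 0 (min start (lines.length : Int)) 1).filter (pvIsDate lines prefix_))
          (some (-n_before)) none
      else []) := by
  rw [pvABefore_eq]
  by_cases hn : 0 < n_before
  · rw [if_pos hn, min_eq_left (hb hn)]
    rw [PySem.List.pyRange_neg_one_eq_reverse]
    rw [show (-1 : Int) + 1 = 0 by ring, show (start.toNat : Int) - 1 + 1 = (start.toNat : Int) by ring]
    have hr : PySem.List.pyRange 0 (start.toNat : Int) 1 = PySem.List.pyRange 0 start 1 := by
      by_cases hs : 0 ≤ start
      · rw [Int.toNat_of_nonneg hs]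
      · rw [PySem.List.pyRange_one_eq_nil (by omega), PySem.List.pyRange_one_eq_nil (by omega)]
    rw [hr, List.filter_reverse]
    simp only [List.nil_append, List.length_nil, Nat.cast_zero, sub_zero]
    rw [show -n_before = -((n_before.toNat : Nat) : Int) by omega]
    rw [PySem.List.slice_from_neg_natCast _ _ (by omega)]
    rw [List.take_reverse, List.reverse_reverse]
  · rw [if_neg hn]
    have h0 : (n_before - (([] : List Int).length : Int)).toNat = 0 := by simp; omega
    rw [h0]
    simp

-- the after component of A equals the after component of B
theorem pvAfter_final (lines : List String) (prefix_ : String) (end_ n_after : Int) :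
    pvAAfter lines prefix_ n_after ((lines.length : Int) - (end_ + 1)).toNat (end_ + 1) [] =
      (if 0 < n_after then
        ((PySem.List.pyRange (end_ + 1) (lines.length : Int) 1).filter (pvIsDate lines prefix_)).take
          n_after.toNat
      else []) := by
  rw [pvAAfter_eq]
  by_cases hn : 0 < n_after
  · rw [if_pos hn]
    by_cases hle : end_ + 1 ≤ (lines.length : Int)
    · rw [show (end_ + 1) + ((((lines.length : Int) - (end_ + 1)).toNat : Nat) : Int)
            = (lines.length : Int) by omega]
      simp only [List.nil_append, List.length_nil, Nat.cast_zero, sub_zero]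
    · rw [show (((lines.length : Int) - (end_ + 1)).toNat : Nat) = 0 by omega]
      rw [PySem.List.pyRange_one_eq_nil (by push_cast; omega : end_ + 1 + ((0 : Nat) : Int) ≤ end_ + 1)]
      rw [PySem.List.pyRange_one_eq_nil (by omega : (lines.length : Int) ≤ end_ + 1)]
      simp
  · rw [if_neg hn]
    have h0 : (n_after - (([] : List Int).length : Int)).toNat = 0 := by simp; omega
    rw [h0]
    simp

theorem collect_context_indices_spec : Claim_equal_collect_context_indices := by
  intro lines start end_ prefix_ n_before n_after _ hpre
  unfold Spec_collect_context_indices collect_context_indices collect_context_indices_alt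
  rw [Prod.mk.injEq]
  exact ⟨pvBefore_final lines prefix_ start n_before hpre.1,
         pvAfter_final lines prefix_ end_ n_after⟩
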